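-- pv_equiv track=rewrite | github.com/eighteyes/know-cli | scripts/graph-coverage.py | find_reachable_from_roots
-- ===== SOURCE A (Python) =====
-- from collections import defaultdict, deque
--
-- def find_reachable_from_roots(graph_data, roots):
--     """BFS to find all entities reachable from roots via depends_on"""
--     graph = graph_data.get('graph', {})
--     reachable = set()
--     queue = deque(roots)
--
--     while queue:
--         current = queue.popleft()
--         if current in reachable:
--             continue
--         reachable.add(current)
--
--         # Add all dependencies to queue
--         if current in graph:
--             for dep in graph[current].get('depends_on', []):
--                 if dep not in reachable:
--                     queue.append(dep)
--
--     return reachable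
-- ===== SOURCE B (Python) =====
-- def find_reachable_from_roots(graph_data, roots):
--     """Level-synchronous BFS: expand the whole frontier at once (no queue,
--     no per-dependency membership filtering at enqueue time)."""
--     graph = graph_data.get('graph', {})
--     reachable = set()
--     frontier = list(roots)
--     while frontier:
--         new = []
--         for n in frontier:
--             if n not in reachable:
--                 reachable.add(n)
--                 new.append(n)
--         frontier = [d for n in new for d in graph.get(n, {}).get('depends_on', [])]
--     return reachable
-- ===== Notes on version B (the rewrite author's own statement) =====
-- stated objective: alternative
-- what changed: Replaces the deque-based one-node-at-a-time BFS (with membership filtering at enqueue time) by a level-synchronous BFS that marks a whole frontier in one pass and builds the next frontier as one flat list of the new nodes' dependencies.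
import Mathlib
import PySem

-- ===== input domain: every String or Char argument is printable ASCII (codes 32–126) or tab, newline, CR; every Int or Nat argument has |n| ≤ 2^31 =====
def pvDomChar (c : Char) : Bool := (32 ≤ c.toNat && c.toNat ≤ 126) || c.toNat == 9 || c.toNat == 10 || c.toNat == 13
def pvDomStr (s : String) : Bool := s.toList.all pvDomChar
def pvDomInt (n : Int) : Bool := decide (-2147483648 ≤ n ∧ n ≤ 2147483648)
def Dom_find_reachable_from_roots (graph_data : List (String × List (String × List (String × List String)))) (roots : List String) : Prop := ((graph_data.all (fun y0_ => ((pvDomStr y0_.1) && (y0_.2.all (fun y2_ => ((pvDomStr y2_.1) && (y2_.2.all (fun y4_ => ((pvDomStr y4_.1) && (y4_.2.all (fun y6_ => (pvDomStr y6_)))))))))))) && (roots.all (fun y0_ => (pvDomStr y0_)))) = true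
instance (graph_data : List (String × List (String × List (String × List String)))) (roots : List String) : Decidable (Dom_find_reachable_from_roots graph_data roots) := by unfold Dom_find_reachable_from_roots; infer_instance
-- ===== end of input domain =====

-- B replaces A's deque-based one-node-at-a-time BFS by a level-synchronous BFS (whole-frontier
-- expansion, no queue, no enqueue-time membership filter); objective: alternative decomposition,
-- same reachable set in the same first-insertion order.

-- ===== PORT A =====
-- shared termination scaffolding: the (finite) universe every queued node lives in,
-- and the number of universe nodes not yet visited (the decreasing measure)
def pvUniv (graph : List (String × List (String × List String))) (roots : List String) : List String :=
  roots ++ graph.flatMap (fun p => (PySem.Dict.mk p.2).getD "depends_on" [])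

def pvUnseen (univ : List String) (reachable : PySem.Set String) : Nat :=
  (univ.filter (fun x => !(PySem.Set.contains reachable x))).length

-- Dict.get? on a raw association list returns a pair of the list (first match)
theorem pvGet?_mem {ν : Type} (l : List (String × ν)) (k : String) (v : ν)
    (h : (PySem.Dict.mk l).get? k = some v) : (k, v) ∈ l := by
  induction l with
  | nil => simp [PySem.Dict.get?] at h
  | cons p rest ih =>
    rcases p with ⟨a, b⟩
    rw [PySem.Dict.get?_mk_cons] at h
    by_cases hk : (a == k) = true
    · rw [if_pos hk] at h
      obtain rfl : b = v := by injection h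
      obtain rfl : a = k := by simpa [beq_iff_eq] using hk
      exact List.mem_cons_self
    · rw [if_neg hk] at h
      exact List.mem_cons_of_mem _ (ih h)

-- the dependencies of any node (first-match lookups, default []) lie inside pvUniv
theorem pvDeps_subset_univ (graph : List (String × List (String × List String)))
    (roots : List String) (n d : String)
    (hd : d ∈ (PySem.Dict.mk ((PySem.Dict.mk graph).getD n [])).getD "depends_on" []) :
    d ∈ pvUniv graph roots := by
  rcases hg : (PySem.Dict.mk graph).get? n with _ | v
  · rw [PySem.Dict.getD_of_get?_eq_none _ [] hg] at hd
    simp [PySem.Dict.getD, PySem.Dict.get?] at hd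
  · rw [PySem.Dict.getD_of_get?_eq_some _ [] hg] at hd
    have hmem : (n, v) ∈ graph := pvGet?_mem _ _ _ hg
    unfold pvUniv
    refine List.mem_append_right _ (List.mem_flatMap.mpr ⟨(n, v), hmem, hd⟩)

-- visiting a new universe node strictly shrinks the unseen count
theorem pvUnseen_lt (univ : List String) (r r' : PySem.Set String)
    (hsub : ∀ x ∈ r, x ∈ r') (c : String) (hcu : c ∈ univ) (hcr' : c ∈ r') (hcr : c ∉ r) :
    pvUnseen univ r' < pvUnseen univ r := by
  obtain ⟨l1, l2, rfl⟩ := List.append_of_mem hcu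
  unfold pvUnseen
  rw [← List.countP_eq_length_filter, ← List.countP_eq_length_filter]
  have hmono : ∀ l : List String, l.countP (fun x => !(PySem.Set.contains r' x)) ≤
      l.countP (fun x => !(PySem.Set.contains r x)) := by
    intro l
    refine List.countP_mono_left (fun a _ ha => ?_)
    simp only [Bool.not_eq_true', ← Bool.not_eq_true, PySem.Set.contains_iff] at *
    exact fun h => ha (hsub a h)
  have hc' : (PySem.Set.contains r' c = true) := (PySem.Set.contains_iff _ _).mpr hcr'
  have hc : (PySem.Set.contains r c = false) := by
    rw [← Bool.not_eq_true, PySem.Set.contains_iff _ _]; exact hcr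
  have h1 := hmono l1; have h2 := hmono l2
  have e1 : (if (!PySem.Set.contains r' c) = true then 1 else 0) = 0 := by rw [hc']; rfl
  have e2 : (if (!PySem.Set.contains r c) = true then 1 else 0) = 1 := by rw [hc]; rfl
  rw [List.countP_append, List.countP_append, List.countP_cons, List.countP_cons, e1, e2]
  omega

-- A's BFS loop: pop left, skip visited, mark, enqueue unvisited dependencies.
-- (hq carries queue ⊆ pvUniv, used only for termination.)
def pvBfsA (graph : List (String × List (String × List String))) (roots : List String)
    (reachable : PySem.Set String) (queue : List String)
    (hq : ∀ x ∈ queue, x ∈ pvUniv graph roots) : List String :=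
  match queue, hq with
  | [], _ => reachable
  | current :: rest, hq =>
    if hc : PySem.Set.contains reachable current = true then
      pvBfsA graph roots reachable rest (fun x hx => hq x (List.mem_cons_of_mem _ hx))
    else
      if (PySem.Dict.mk graph).contains current = true then
        pvBfsA graph roots (PySem.Set.add reachable current)
          (rest ++ ((PySem.Dict.mk ((PySem.Dict.mk graph).getD current [])).getD "depends_on" []).filter
            (fun d => !(PySem.Set.contains (PySem.Set.add reachable current) d)))
          (fun x hx => by
            rcases List.mem_append.mp hx with h | h
            · exact hq x (List.mem_cons_of_mem _ h)
            · exact pvDeps_subset_univ graph roots current x (List.mem_of_mem_filter h))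
      else
        pvBfsA graph roots (PySem.Set.add reachable current) rest
          (fun x hx => hq x (List.mem_cons_of_mem _ hx))
termination_by (pvUnseen (pvUniv graph roots) reachable, queue.length)
decreasing_by
  · apply Prod.Lex.right; simp
  · apply Prod.Lex.left
    exact pvUnseen_lt _ _ _ (fun x hx => (PySem.Set.mem_add _ _ _).mpr (Or.inl hx)) current
      (hq current List.mem_cons_self) ((PySem.Set.mem_add _ _ _).mpr (Or.inr rfl))
      (fun hm => hc ((PySem.Set.contains_iff _ _).mpr hm))
  · apply Prod.Lex.left
    exact pvUnseen_lt _ _ _ (fun x hx => (PySem.Set.mem_add _ _ _).mpr (Or.inl hx)) current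
      (hq current List.mem_cons_self) ((PySem.Set.mem_add _ _ _).mpr (Or.inr rfl))
      (fun hm => hc ((PySem.Set.contains_iff _ _).mpr hm))

def find_reachable_from_roots (graph_data : List (String × List (String × List (String × List String)))) (roots : List String) : List String :=
  pvBfsA ((PySem.Dict.mk graph_data).getD "graph" []) roots PySem.Set.empty roots
    (fun x hx => List.mem_append_left _ hx)

-- ===== PORT B =====
-- graph.get(n, {}).get('depends_on', [])
def pvDepsB (graph : List (String × List (String × List String))) (n : String) : List String :=
  (PySem.Dict.mk ((PySem.Dict.mk graph).getD n [])).getD "depends_on" []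

-- the per-level marking loop: for n in frontier: if n not in reachable: add; new.append(n)
def pvCollect (reachable : PySem.Set String) (frontier : List String) :
    PySem.Set String × List String :=
  match frontier with
  | [] => (reachable, [])
  | n :: rest =>
    if PySem.Set.contains reachable n = true then pvCollect reachable rest
    else
      let p := pvCollect (PySem.Set.add reachable n) rest
      (p.1, n :: p.2)

theorem pvCollect_fst (reachable : PySem.Set String) (frontier : List String) :
    (pvCollect reachable frontier).1 = reachable ++ (pvCollect reachable frontier).2 := by
  induction frontier generalizing reachable with
  | nil => simp [pvCollect]
  | cons n rest ih =>
    by_cases hc : PySem.Set.contains reachable n = true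
    · rw [pvCollect, if_pos hc]
      exact ih reachable
    · have hn : n ∉ reachable := fun hm => hc ((PySem.Set.contains_iff _ _).mpr hm)
      rw [pvCollect, if_neg hc]
      dsimp only
      rw [ih (PySem.Set.add reachable n), PySem.Set.add_of_not_mem hn]
      simp

theorem pvCollect_snd_mem (reachable : PySem.Set String) (frontier : List String) (x : String)
    (hx : x ∈ (pvCollect reachable frontier).2) : x ∈ frontier ∧ x ∉ reachable := by
  induction frontier generalizing reachable with
  | nil => simp [pvCollect] at hx
  | cons n rest ih =>
    by_cases hc : PySem.Set.contains reachable n = true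
    · rw [pvCollect, if_pos hc] at hx
      obtain ⟨h1, h2⟩ := ih reachable hx
      exact ⟨List.mem_cons_of_mem _ h1, h2⟩
    · rw [pvCollect, if_neg hc] at hx
      rcases List.mem_cons.mp hx with rfl | hx
      · exact ⟨List.mem_cons_self, fun hm => hc ((PySem.Set.contains_iff _ _).mpr hm)⟩
      · obtain ⟨h1, h2⟩ := ih _ hx
        refine ⟨List.mem_cons_of_mem _ h1, fun hr => h2 ((PySem.Set.mem_add _ _ _).mpr (Or.inl hr))⟩

-- B's loop: mark the whole frontier, then the next frontier is the flat list of
-- the newly marked nodes' dependencies.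
def pvBfsB (graph : List (String × List (String × List String))) (roots : List String)
    (reachable : PySem.Set String) (frontier : List String)
    (hf : ∀ x ∈ frontier, x ∈ pvUniv graph roots) : List String :=
  match frontier, hf with
  | [], _ => reachable
  | n0 :: rest, hf =>
    pvBfsB graph roots (pvCollect reachable (n0 :: rest)).1
      ((pvCollect reachable (n0 :: rest)).2.flatMap (fun n => pvDepsB graph n))
      (fun x hx => by
        obtain ⟨n, _, hd⟩ := List.mem_flatMap.mp hx
        exact pvDeps_subset_univ graph roots n x hd)
termination_by (pvUnseen (pvUniv graph roots) reachable, frontier.length)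
decreasing_by
  rcases h2 : (pvCollect reachable (n0 :: rest)).2 with _ | ⟨c, tl⟩
  · have h1 : (pvCollect reachable (n0 :: rest)).1 = reachable := by
      rw [pvCollect_fst, h2]; simp
    simp only [h1, h2]
    apply Prod.Lex.right; simp
  · apply Prod.Lex.left
    have hc : c ∈ (pvCollect reachable (n0 :: rest)).2 := by rw [h2]; exact List.mem_cons_self
    obtain ⟨hcf, hcr⟩ := pvCollect_snd_mem _ _ _ hc
    refine pvUnseen_lt _ _ _ (fun x hx => ?_) c (hf c hcf) ?_ hcr
    · rw [pvCollect_fst]; exact List.mem_append_left _ hx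
    · rw [pvCollect_fst]; exact List.mem_append_right _ hc

def find_reachable_from_roots_alt (graph_data : List (String × List (String × List (String × List String)))) (roots : List String) : List String :=
  pvBfsB ((PySem.Dict.mk graph_data).getD "graph" []) roots PySem.Set.empty roots
    (fun x hx => List.mem_append_left _ hx)

-- ===== PRECONDITION & SPEC =====
def Spec_find_reachable_from_roots (graph_data : List (String × List (String × List (String × List String)))) (roots : List String) (out : List String) : Prop := out = find_reachable_from_roots_alt graph_data roots
instance (graph_data : List (String × List (String × List (String × List String)))) (roots : List String) (out : List String) : Decidable (Spec_find_reachable_from_roots graph_data roots out) := by unfold Spec_find_reachable_from_roots; infer_instance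

-- ===== CLAIM (what is proved, stated in full; the proofs are below) =====
def Claim_equal_find_reachable_from_roots : Prop := ∀ (graph_data : List (String × List (String × List (String × List String)))) (roots : List String), Dom_find_reachable_from_roots graph_data roots → Spec_find_reachable_from_roots graph_data roots (find_reachable_from_roots graph_data roots)

-- ===== LEMMAS AND PROOFS =====

-- a queued node already visited is skipped: it can be dropped from the queue
theorem pvSkip (graph : List (String × List (String × List String))) (roots : List String)
    (k : Nat) :
    ∀ (r : PySem.Set String) (q1 q2 : List String) (x : String) hq hq',
      pvUnseen (pvUniv graph roots) r ≤ k → x ∈ r →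
      pvBfsA graph roots r (q1 ++ x :: q2) hq = pvBfsA graph roots r (q1 ++ q2) hq' := by
  induction k using Nat.strong_induction_on with
  | _ k ihk =>
    intro r q1 q2 x hq hq' hk hx
    induction q1 generalizing q2 with
    | nil =>
      have hc : PySem.Set.contains r x = true := (PySem.Set.contains_iff _ _).mpr hx
      show pvBfsA graph roots r (x :: q2) hq = pvBfsA graph roots r q2 hq'
      rw [pvBfsA]
      simp only [hc, dite_true]
    | cons c q1' ihq =>
      show pvBfsA graph roots r (c :: (q1' ++ x :: q2)) hq = pvBfsA graph roots r (c :: (q1' ++ q2)) hq'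
      rw [pvBfsA, pvBfsA]
      by_cases hc : PySem.Set.contains r c = true
      · simp only [hc, dite_true]
        exact ihq _ _ _
      · simp only [hc, dite_false]
        have hlt : pvUnseen (pvUniv graph roots) (PySem.Set.add r c) <
            pvUnseen (pvUniv graph roots) r := by
          refine pvUnseen_lt _ _ _ (fun y hy => (PySem.Set.mem_add _ _ _).mpr (Or.inl hy)) c
            (hq c List.mem_cons_self) ((PySem.Set.mem_add _ _ _).mpr (Or.inr rfl)) ?_
          exact fun hm => hc ((PySem.Set.contains_iff _ _).mpr hm)
        have hx' : x ∈ PySem.Set.add r c := (PySem.Set.mem_add _ _ _).mpr (Or.inl hx)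
        by_cases hg : (PySem.Dict.mk graph).contains c = true
        · simp only [hg, if_true]
          simp only [List.append_assoc]
          exact ihk _ (by omega) _ _ _ _ _ _ le_rfl hx'
        · simp only [hg, if_false]
          exact ihk _ (by omega) _ _ _ _ _ _ le_rfl hx'

-- unfold and congruence helpers for the two loops (proofs are irrelevant arguments)
theorem pvBfsA_nil (graph : List (String × List (String × List String))) (roots : List String)
    (r : PySem.Set String) (hq : ∀ x ∈ ([] : List String), x ∈ pvUniv graph roots) :
    pvBfsA graph roots r [] hq = r := by rw [pvBfsA]

theorem pvBfsA_cons (graph : List (String × List (String × List String))) (roots : List String)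
    (r : PySem.Set String) (current : String) (rest : List String)
    (hq : ∀ x ∈ current :: rest, x ∈ pvUniv graph roots) :
    pvBfsA graph roots r (current :: rest) hq
    = if hc : PySem.Set.contains r current = true then
        pvBfsA graph roots r rest (fun x hx => hq x (List.mem_cons_of_mem _ hx))
      else
        if (PySem.Dict.mk graph).contains current = true then
          pvBfsA graph roots (PySem.Set.add r current)
            (rest ++ ((PySem.Dict.mk ((PySem.Dict.mk graph).getD current [])).getD "depends_on" []).filter
              (fun d => !(PySem.Set.contains (PySem.Set.add r current) d)))
            (fun x hx => by
              rcases List.mem_append.mp hx with h | h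
              · exact hq x (List.mem_cons_of_mem _ h)
              · exact pvDeps_subset_univ graph roots current x (List.mem_of_mem_filter h))
        else
          pvBfsA graph roots (PySem.Set.add r current) rest
            (fun x hx => hq x (List.mem_cons_of_mem _ hx)) := by
  rw [pvBfsA]

theorem pvBfsA_congr (graph : List (String × List (String × List String))) (roots : List String)
    {r r' : PySem.Set String} {q q' : List String} (hr : r = r') (he : q = q')
    (hq : ∀ x ∈ q, x ∈ pvUniv graph roots) (hq' : ∀ x ∈ q', x ∈ pvUniv graph roots) :
    pvBfsA graph roots r q hq = pvBfsA graph roots r' q' hq' := by subst hr; subst he; rfl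

theorem pvBfsB_nil (graph : List (String × List (String × List String))) (roots : List String)
    (r : PySem.Set String) (hf : ∀ x ∈ ([] : List String), x ∈ pvUniv graph roots) :
    pvBfsB graph roots r [] hf = r := by rw [pvBfsB]

theorem pvBfsB_cons (graph : List (String × List (String × List String))) (roots : List String)
    (r : PySem.Set String) (n0 : String) (rest : List String)
    (hf : ∀ x ∈ n0 :: rest, x ∈ pvUniv graph roots) :
    pvBfsB graph roots r (n0 :: rest) hf
    = pvBfsB graph roots (pvCollect r (n0 :: rest)).1
        ((pvCollect r (n0 :: rest)).2.flatMap (fun n => pvDepsB graph n))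
        (fun x hx => by
          obtain ⟨n, _, hd⟩ := List.mem_flatMap.mp hx
          exact pvDeps_subset_univ graph roots n x hd) := by
  rw [pvBfsB]

theorem pvBfsB_congr (graph : List (String × List (String × List String))) (roots : List String)
    {r r' : PySem.Set String} {q q' : List String} (hr : r = r') (he : q = q')
    (hq : ∀ x ∈ q, x ∈ pvUniv graph roots) (hq' : ∀ x ∈ q', x ∈ pvUniv graph roots) :
    pvBfsB graph roots r q hq = pvBfsB graph roots r' q' hq' := by subst hr; subst he; rfl

-- A's enqueue-time filter is irrelevant: visited dependencies would be skipped anyway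
theorem pvDrop (graph : List (String × List (String × List String))) (roots : List String)
    (r : PySem.Set String) :
    ∀ (q2 q1 : List String) hq hq',
      pvBfsA graph roots r (q1 ++ q2.filter (fun d => !(PySem.Set.contains r d))) hq
      = pvBfsA graph roots r (q1 ++ q2) hq' := by
  intro q2
  induction q2 with
  | nil => intro q1 hq hq'; rfl
  | cons d rest ih =>
    intro q1 hq hq'
    have hU : ∀ x ∈ q1 ++ rest, x ∈ pvUniv graph roots := by
      intro y hy
      rcases List.mem_append.mp hy with h | h
      · exact hq' y (List.mem_append_left _ h)
      · exact hq' y (List.mem_append_right _ (List.mem_cons_of_mem _ h))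
    by_cases hd : PySem.Set.contains r d = true
    · have hdm : d ∈ r := (PySem.Set.contains_iff r d).mp hd
      have h1 : (d :: rest).filter (fun d => !(PySem.Set.contains r d))
          = rest.filter (fun d => !(PySem.Set.contains r d)) := by
        simp [List.filter_cons, hdm]
      calc pvBfsA graph roots r (q1 ++ (d :: rest).filter (fun d => !(PySem.Set.contains r d))) hq
          = pvBfsA graph roots r (q1 ++ rest.filter (fun d => !(PySem.Set.contains r d)))
              (by rw [← h1]; exact hq) := pvBfsA_congr _ _ rfl (by rw [h1]) _ _
        _ = pvBfsA graph roots r (q1 ++ rest) hU := ih q1 _ hU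
        _ = pvBfsA graph roots r (q1 ++ d :: rest) hq' :=
            (pvSkip graph roots (pvUnseen (pvUniv graph roots) r) r q1 rest d hq' hU le_rfl
              ((PySem.Set.contains_iff r d).mp hd)).symm
    · have hdm : d ∉ r := fun hm => hd ((PySem.Set.contains_iff r d).mpr hm)
      have h1 : (d :: rest).filter (fun d => !(PySem.Set.contains r d))
          = d :: rest.filter (fun d => !(PySem.Set.contains r d)) := by
        simp [List.filter_cons, hdm]
      have e1 : q1 ++ (d :: rest).filter (fun d => !(PySem.Set.contains r d))
          = (q1 ++ [d]) ++ rest.filter (fun d => !(PySem.Set.contains r d)) := by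
        rw [h1]; simp
      have e2 : q1 ++ d :: rest = (q1 ++ [d]) ++ rest := by simp
      calc pvBfsA graph roots r (q1 ++ (d :: rest).filter (fun d => !(PySem.Set.contains r d))) hq
          = pvBfsA graph roots r ((q1 ++ [d]) ++ rest.filter (fun d => !(PySem.Set.contains r d)))
              (by rw [← e1]; exact hq) := pvBfsA_congr _ _ rfl e1 _ _
        _ = pvBfsA graph roots r ((q1 ++ [d]) ++ rest) (by rw [← e2]; exact hq') :=
            ih (q1 ++ [d]) _ _
        _ = pvBfsA graph roots r (q1 ++ d :: rest) hq' := pvBfsA_congr _ _ rfl e2.symm _ _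

-- not-in-graph nodes contribute no dependencies
theorem pvDepsB_of_not_contains (graph : List (String × List (String × List String)))
    (n : String) (hg : ¬ (PySem.Dict.mk graph).contains n = true) :
    pvDepsB graph n = [] := by
  unfold pvDepsB
  have : (PySem.Dict.mk graph).get? n = none := by
    rw [PySem.Dict.get?_eq_none_iff_contains _ n]
    exact Bool.eq_false_iff.mpr hg
  rw [PySem.Dict.getD_of_get?_eq_none _ [] this]
  rfl

-- processing one frontier chunk of A's queue = one level of B
theorem pvChunk (graph : List (String × List (String × List String))) (roots : List String) :
    ∀ (f : List String) (r : PySem.Set String) (q : List String) hq hq',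
      pvBfsA graph roots r (f ++ q) hq
      = pvBfsA graph roots (pvCollect r f).1
          (q ++ (pvCollect r f).2.flatMap (fun n => pvDepsB graph n)) hq' := by
  intro f
  induction f with
  | nil =>
    intro r q hq hq'
    exact pvBfsA_congr _ _ rfl (by simp [pvCollect]) _ _
  | cons c f' ih =>
    intro r q hq hq'
    have hU : ∀ x ∈ f' ++ q, x ∈ pvUniv graph roots := fun x hx =>
      hq x (List.mem_cons_of_mem _ hx)
    have hQ : ∀ x ∈ q, x ∈ pvUniv graph roots := fun x hx =>
      hU x (List.mem_append_right _ hx)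
    have hF : ∀ (s : List String) (x : String),
        x ∈ s.flatMap (fun n => pvDepsB graph n) → x ∈ pvUniv graph roots := by
      intro s x hx
      obtain ⟨n, _, hd⟩ := List.mem_flatMap.mp hx
      exact pvDeps_subset_univ graph roots n x hd
    by_cases hc : PySem.Set.contains r c = true
    · have hcol : pvCollect r (c :: f') = pvCollect r f' := by rw [pvCollect, if_pos hc]
      calc pvBfsA graph roots r (c :: (f' ++ q)) hq
          = pvBfsA graph roots r (f' ++ q) hU := by rw [pvBfsA_cons, dif_pos hc]
        _ = pvBfsA graph roots (pvCollect r f').1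
              (q ++ (pvCollect r f').2.flatMap (fun n => pvDepsB graph n))
              (by intro x hx
                  rcases List.mem_append.mp hx with h | h
                  · exact hQ x h
                  · exact hF _ x h) := ih r q hU _
        _ = pvBfsA graph roots (pvCollect r (c :: f')).1
              (q ++ (pvCollect r (c :: f')).2.flatMap (fun n => pvDepsB graph n)) hq' :=
            pvBfsA_congr _ _ (by rw [hcol]) (by rw [hcol]) _ _
    · have hcol : pvCollect r (c :: f')
          = ((pvCollect (PySem.Set.add r c) f').1,
             c :: (pvCollect (PySem.Set.add r c) f').2) := by
        rw [pvCollect, if_neg hc]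
      have hD : ∀ x ∈ pvDepsB graph c, x ∈ pvUniv graph roots := fun x hx =>
        pvDeps_subset_univ graph roots c x hx
      by_cases hg : (PySem.Dict.mk graph).contains c = true
      · calc pvBfsA graph roots r (c :: (f' ++ q)) hq
            = pvBfsA graph roots (PySem.Set.add r c)
                ((f' ++ q) ++ (pvDepsB graph c).filter
                  (fun d => !(PySem.Set.contains (PySem.Set.add r c) d)))
                (by intro x hx
                    rcases List.mem_append.mp hx with h | h
                    · exact hU x h
                    · exact hD x (List.mem_of_mem_filter h)) := by
              rw [pvBfsA_cons, dif_neg hc, if_pos hg]; rfl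
          _ = pvBfsA graph roots (PySem.Set.add r c) ((f' ++ q) ++ pvDepsB graph c)
                (by intro x hx
                    rcases List.mem_append.mp hx with h | h
                    · exact hU x h
                    · exact hD x h) :=
              pvDrop graph roots (PySem.Set.add r c) (pvDepsB graph c) (f' ++ q) _ _
          _ = pvBfsA graph roots (PySem.Set.add r c) (f' ++ (q ++ pvDepsB graph c))
                (by intro x hx
                    rcases List.mem_append.mp hx with h | h
                    · exact hU x (List.mem_append_left _ h)
                    · rcases List.mem_append.mp h with h2 | h2
                      · exact hQ x h2
                      · exact hD x h2) :=
              pvBfsA_congr _ _ rfl (List.append_assoc _ _ _) _ _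
          _ = pvBfsA graph roots (pvCollect (PySem.Set.add r c) f').1
                ((q ++ pvDepsB graph c) ++
                  (pvCollect (PySem.Set.add r c) f').2.flatMap (fun n => pvDepsB graph n))
                (by intro x hx
                    rcases List.mem_append.mp hx with h | h
                    · rcases List.mem_append.mp h with h2 | h2
                      · exact hQ x h2
                      · exact hD x h2
                    · exact hF _ x h) := ih (PySem.Set.add r c) (q ++ pvDepsB graph c) _ _
          _ = pvBfsA graph roots (pvCollect r (c :: f')).1
                (q ++ (pvCollect r (c :: f')).2.flatMap (fun n => pvDepsB graph n)) hq' :=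
              pvBfsA_congr _ _ (by rw [hcol]) (by rw [hcol]; simp [List.append_assoc]) _ _
      · calc pvBfsA graph roots r (c :: (f' ++ q)) hq
            = pvBfsA graph roots (PySem.Set.add r c) (f' ++ q) hU := by
              rw [pvBfsA_cons, dif_neg hc, if_neg hg]
          _ = pvBfsA graph roots (pvCollect (PySem.Set.add r c) f').1
                (q ++ (pvCollect (PySem.Set.add r c) f').2.flatMap (fun n => pvDepsB graph n))
                (by intro x hx
                    rcases List.mem_append.mp hx with h | h
                    · exact hQ x h
                    · exact hF _ x h) := ih (PySem.Set.add r c) q _ _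
          _ = pvBfsA graph roots (pvCollect r (c :: f')).1
                (q ++ (pvCollect r (c :: f')).2.flatMap (fun n => pvDepsB graph n)) hq' :=
              pvBfsA_congr _ _ (by rw [hcol])
                (by rw [hcol]; simp [pvDepsB_of_not_contains graph c hg]) _ _

-- the loops agree from any common state
theorem pvMain (graph : List (String × List (String × List String))) (roots : List String)
    (k : Nat) :
    ∀ (r : PySem.Set String) (f : List String) hqA hqB,
      pvUnseen (pvUniv graph roots) r ≤ k →
      pvBfsA graph roots r f hqA = pvBfsB graph roots r f hqB := by
  induction k using Nat.strong_induction_on with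
  | _ k ihk =>
    intro r f hqA hqB hk
    match f with
    | [] => rw [pvBfsA_nil, pvBfsB_nil]
    | n0 :: rest =>
      have hflat : ∀ x ∈ (pvCollect r (n0 :: rest)).2.flatMap (fun n => pvDepsB graph n),
          x ∈ pvUniv graph roots := by
        intro x hx
        obtain ⟨n, _, hd⟩ := List.mem_flatMap.mp hx
        exact pvDeps_subset_univ graph roots n x hd
      rw [pvBfsB_cons]
      have hstep : pvBfsA graph roots r (n0 :: rest) hqA
          = pvBfsA graph roots (pvCollect r (n0 :: rest)).1
              ((pvCollect r (n0 :: rest)).2.flatMap (fun n => pvDepsB graph n)) hflat := by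
        calc pvBfsA graph roots r (n0 :: rest) hqA
            = pvBfsA graph roots r ((n0 :: rest) ++ [])
                (fun x hx => hqA x (by simpa using hx)) :=
              pvBfsA_congr _ _ rfl (List.append_nil _).symm _ _
          _ = pvBfsA graph roots (pvCollect r (n0 :: rest)).1
                ([] ++ (pvCollect r (n0 :: rest)).2.flatMap (fun n => pvDepsB graph n))
                (fun x hx => hflat x (by simpa using hx)) :=
              pvChunk graph roots (n0 :: rest) r [] _ _
          _ = pvBfsA graph roots (pvCollect r (n0 :: rest)).1
                ((pvCollect r (n0 :: rest)).2.flatMap (fun n => pvDepsB graph n)) hflat :=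
              pvBfsA_congr _ _ rfl (List.nil_append _) _ _
      rw [hstep]
      by_cases h2 : (pvCollect r (n0 :: rest)).2 = []
      · have hf0 : (pvCollect r (n0 :: rest)).2.flatMap (fun n => pvDepsB graph n) = [] := by
          rw [h2]; rfl
        calc pvBfsA graph roots (pvCollect r (n0 :: rest)).1
              ((pvCollect r (n0 :: rest)).2.flatMap (fun n => pvDepsB graph n)) hflat
            = pvBfsA graph roots (pvCollect r (n0 :: rest)).1 [] (by simp) :=
              pvBfsA_congr _ _ rfl hf0 _ _
          _ = (pvCollect r (n0 :: rest)).1 := pvBfsA_nil _ _ _ _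
          _ = pvBfsB graph roots (pvCollect r (n0 :: rest)).1 [] (by simp) :=
              (pvBfsB_nil _ _ _ _).symm
          _ = pvBfsB graph roots (pvCollect r (n0 :: rest)).1
                ((pvCollect r (n0 :: rest)).2.flatMap (fun n => pvDepsB graph n)) _ :=
              pvBfsB_congr _ _ rfl hf0.symm _ _
      · obtain ⟨c, hc⟩ := List.exists_mem_of_ne_nil _ h2
        obtain ⟨hcf, hcr⟩ := pvCollect_snd_mem _ _ _ hc
        have hlt : pvUnseen (pvUniv graph roots) (pvCollect r (n0 :: rest)).1 <
            pvUnseen (pvUniv graph roots) r := by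
          refine pvUnseen_lt _ _ _ (fun x hx => ?_) c (hqB c hcf) ?_ hcr
          · rw [pvCollect_fst]; exact List.mem_append_left _ hx
          · rw [pvCollect_fst]; exact List.mem_append_right _ hc
        exact ihk _ (by omega) _ _ _ _ le_rfl

-- ===== VERDICT (by name: the statement is the Claim_ definition above) =====
theorem find_reachable_from_roots_spec : Claim_equal_find_reachable_from_roots := by
  intro graph_data roots _
  unfold Spec_find_reachable_from_roots find_reachable_from_roots find_reachable_from_roots_alt
  exact pvMain _ roots _ PySem.Set.empty roots _ _ le_rfl
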